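-- pv_equiv track=rewrite | github.com/Rokaeus/Advent-of-Code-2021 | Python/advent-of-code-2021/02/main.py | submarine_movement
-- ===== SOURCE A (Python) =====
-- def submarine_movement(tuples):
--     x = 0
--     y = 0
--     for row in (tuples):
--         if row[0] == "forward":
--             x += int(row[1])
--         elif row[0] == "down":
--             y += int(row[1])
--         elif row[0] == "up":
--             y -= int(row[1])
--     return x,y, (x*y)
-- ===== SOURCE B (Python) =====
-- def submarine_movement(tuples):
--     x = sum(int(r[1]) for r in tuples if r[0] == "forward")
--     y = sum(int(r[1]) for r in tuples if r[0] == "down") \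
--         - sum(int(r[1]) for r in tuples if r[0] == "up")
--     return x, y, (x * y)
-- ===== Notes on version B (the rewrite author's own statement) =====
-- stated objective: alternative
-- what changed: Replaces the single branching accumulation loop with three independent filtered sums (forward, down, up) combined arithmetically.
-- outside the precondition, e.g. on submarine_movement([('forward', 'abc')]): A raises ValueError, B raises ValueError
import Mathlib
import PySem

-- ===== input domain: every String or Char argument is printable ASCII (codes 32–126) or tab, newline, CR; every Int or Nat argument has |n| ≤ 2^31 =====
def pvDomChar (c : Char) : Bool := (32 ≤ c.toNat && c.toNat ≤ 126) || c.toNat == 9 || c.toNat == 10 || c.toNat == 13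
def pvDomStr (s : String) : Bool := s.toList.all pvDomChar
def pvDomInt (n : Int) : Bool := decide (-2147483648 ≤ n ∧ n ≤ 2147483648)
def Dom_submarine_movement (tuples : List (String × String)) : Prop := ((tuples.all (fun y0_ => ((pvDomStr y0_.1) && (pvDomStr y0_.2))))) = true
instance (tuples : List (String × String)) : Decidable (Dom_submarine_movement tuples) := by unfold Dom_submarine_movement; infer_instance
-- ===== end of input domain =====

-- B replaces A's single branching accumulation loop by three filtered sums; objective: alternative decomposition.
-- Pre_ excludes inputs where a matched row's second string is not int-parsable (there Python A raises ValueError).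


-- ===== PORT A =====
-- single pass with branch; int(row[1]) = PySem.Int.ofStr? (the `.getD 0` is unreachable inside Pre_)
def submarine_movement (tuples : List (String × String)) : Int × Int × Int :=
  let p := tuples.foldl (fun (s : Int × Int) row =>
    if row.1 = "forward" then (s.1 + (PySem.Int.ofStr? row.2).getD 0, s.2)
    else if row.1 = "down" then (s.1, s.2 + (PySem.Int.ofStr? row.2).getD 0)
    else if row.1 = "up" then (s.1, s.2 - (PySem.Int.ofStr? row.2).getD 0)
    else s) (0, 0)
  (p.1, p.2, p.1 * p.2)

-- ===== PORT B =====
-- three filtered sums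
def submarine_movement_alt (tuples : List (String × String)) : Int × Int × Int :=
  let x := ((tuples.filter (fun r => r.1 == "forward")).map (fun r => (PySem.Int.ofStr? r.2).getD 0)).sum
  let y := ((tuples.filter (fun r => r.1 == "down")).map (fun r => (PySem.Int.ofStr? r.2).getD 0)).sum
         - ((tuples.filter (fun r => r.1 == "up")).map (fun r => (PySem.Int.ofStr? r.2).getD 0)).sum
  (x, y, x * y)

-- ===== PRECONDITION & SPEC =====
-- Pre_ excludes exactly the inputs where A raises ValueError: a row matching a command whose value string is not int-parsable.
def Pre_submarine_movement (tuples : List (String × String)) : Prop :=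
  ∀ r ∈ tuples, (r.1 = "forward" ∨ r.1 = "down" ∨ r.1 = "up") → (PySem.Int.ofStr? r.2).isSome

instance (tuples : List (String × String)) : Decidable (Pre_submarine_movement tuples) := by
  unfold Pre_submarine_movement; infer_instance

def pvWitness_submarine_movement : (List (String × String)) :=
  [("forward", "3"), ("down", "2"), ("up", "1"), ("noop", "zz")]

def Spec_submarine_movement (tuples : List (String × String)) (out : Int × Int × Int) : Prop := out = submarine_movement_alt tuples
instance (tuples : List (String × String)) (out : Int × Int × Int) : Decidable (Spec_submarine_movement tuples out) := by unfold Spec_submarine_movement; infer_instance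

-- ===== CLAIM (what is proved, stated in full; the proofs are below) =====
def Claim_equal_submarine_movement : Prop := ∀ (tuples : List (String × String)), Dom_submarine_movement tuples → Pre_submarine_movement tuples → Spec_submarine_movement tuples (submarine_movement tuples)

-- ===== LEMMAS AND PROOFS =====

-- loop invariant: the fold's state is the start state shifted by the three filtered sums
theorem sm_fold_eq (tuples : List (String × String)) (x y : Int) :
    tuples.foldl (fun (s : Int × Int) row =>
      if row.1 = "forward" then (s.1 + (PySem.Int.ofStr? row.2).getD 0, s.2)
      else if row.1 = "down" then (s.1, s.2 + (PySem.Int.ofStr? row.2).getD 0)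
      else if row.1 = "up" then (s.1, s.2 - (PySem.Int.ofStr? row.2).getD 0)
      else s) (x, y)
    = (x + ((tuples.filter (fun r => r.1 == "forward")).map (fun r => (PySem.Int.ofStr? r.2).getD 0)).sum,
       y + ((tuples.filter (fun r => r.1 == "down")).map (fun r => (PySem.Int.ofStr? r.2).getD 0)).sum
         - ((tuples.filter (fun r => r.1 == "up")).map (fun r => (PySem.Int.ofStr? r.2).getD 0)).sum) := by
  induction tuples generalizing x y with
  | nil => simp
  | cons r ts ih =>
    simp only [List.foldl_cons, List.filter_cons, beq_iff_eq]
    by_cases h1 : r.1 = "forward" <;> by_cases h2 : r.1 = "down" <;> by_cases h3 : r.1 = "up" <;>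
      simp only [h1, h2, h3, if_pos, if_neg, not_false_iff,
        List.map_cons, List.sum_cons, ih] <;>
      simp_all <;> ring

-- ===== VERDICT (by name: the statement is the Claim_ definition above) =====
theorem submarine_movement_spec : Claim_equal_submarine_movement := by
  intro tuples _ _
  unfold Spec_submarine_movement submarine_movement submarine_movement_alt
  rw [sm_fold_eq]
  simp
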